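-- pv_equiv track=rewrite | github.com/fengshnn/HFCEFC | QT-pyside2/functions.py | dotCompute
-- ===== SOURCE A (Python) =====
-- def dotCompute(data):
--     datax = []
--     datay = []
--     for i in range(len(data) - 2):
--         x = data[i + 1] - data[i]
--         y = data[i + 2] - data[i + 1]
--         datax.append(x)
--         datay.append(y)
--     return datax, datay
-- ===== SOURCE B (Python) =====
-- def dotCompute(data):
--     # Divide and conquer: split with a two-element overlap, solve both halves
--     # recursively, and concatenate the results.
--     n = len(data)
--     if n < 3:
--         return [], []
--     if n == 3:
--         return [data[1] - data[0]], [data[2] - data[1]]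
--     m = min(n // 2, n - 3)
--     lx, ly = dotCompute(data[:m + 2])
--     rx, ry = dotCompute(data[m:])
--     return lx + rx, ly + ry
-- ===== Notes on version B (the rewrite author's own statement) =====
-- stated objective: alternative
-- what changed: Replaces the single left-to-right dual-accumulator index loop with a divide-and-conquer recursion: split the list at the middle with a two-element overlap, solve both halves recursively, and concatenate the two result pairs.
import Mathlib
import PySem

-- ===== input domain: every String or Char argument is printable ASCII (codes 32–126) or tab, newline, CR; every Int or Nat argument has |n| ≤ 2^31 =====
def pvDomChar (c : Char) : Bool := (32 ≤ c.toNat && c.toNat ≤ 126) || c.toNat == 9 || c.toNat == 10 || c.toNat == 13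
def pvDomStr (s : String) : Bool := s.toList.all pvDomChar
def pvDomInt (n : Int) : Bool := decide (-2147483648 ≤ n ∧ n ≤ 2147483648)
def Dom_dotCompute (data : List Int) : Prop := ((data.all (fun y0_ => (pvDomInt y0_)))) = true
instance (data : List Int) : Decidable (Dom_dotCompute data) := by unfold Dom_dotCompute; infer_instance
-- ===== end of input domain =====

-- B replaces A's dual-accumulator index loop with an overlap-splitting divide-and-conquer
-- recursion over the list (alternative decomposition, same results).

-- ===== PORT A =====
-- data[i+1] - data[i] etc. ported with pyGetD 0: for i in range(len(data)-2) all indices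
-- i, i+1, i+2 are in range, so the default is never used and the port is exact.
def dotCompute (data : List Int) : List Int × List Int :=
  (PySem.List.pyRange 0 ((data.length : Int) - 2) 1).foldl
    (fun (st : List Int × List Int) i =>
      (st.1 ++ [PySem.List.pyGetD data (i + 1) 0 - PySem.List.pyGetD data i 0],
       st.2 ++ [PySem.List.pyGetD data (i + 2) 0 - PySem.List.pyGetD data (i + 1) 0]))
    ([], [])

-- ===== PORT B =====
-- data[:m+2] / data[m:] with 0 ≤ m ≤ len(data) are exactly List.take (m+2) / List.drop m;
-- data[0], data[1], data[2] are in range in their branch, ported with pyGetD 0 (default unused).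
-- The fuel parameter (data.length suffices: each recursive call strictly shrinks the list)
-- only makes the recursion structural; it changes no computed value.
def dotComputeGo : Nat → List Int → List Int × List Int
  | 0, _ => ([], [])
  | fuel + 1, data =>
    let n := data.length
    if n < 3 then ([], [])
    else if n = 3 then
      ([PySem.List.pyGetD data 1 0 - PySem.List.pyGetD data 0 0],
       [PySem.List.pyGetD data 2 0 - PySem.List.pyGetD data 1 0])
    else
      let m := min (n / 2) (n - 3)
      let l := dotComputeGo fuel (data.take (m + 2))
      let r := dotComputeGo fuel (data.drop m)
      (l.1 ++ r.1, l.2 ++ r.2)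

def dotCompute_alt (data : List Int) : List Int × List Int :=
  dotComputeGo data.length data

-- ===== PRECONDITION & SPEC =====
def Spec_dotCompute (data : List Int) (out : List Int × List Int) : Prop := out = dotCompute_alt data
instance (data : List Int) (out : List Int × List Int) : Decidable (Spec_dotCompute data out) := by unfold Spec_dotCompute; infer_instance

-- ===== CLAIM (what is proved, stated in full; the proofs are below) =====
def Claim_equal_dotCompute : Prop := ∀ (data : List Int), Dom_dotCompute data → Spec_dotCompute data (dotCompute data)

-- ===== LEMMAS AND PROOFS =====

-- the first-difference list; both ports are proved equal to (dropLast, tail) of it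
def pvDiffs (data : List Int) : List Int :=
  (data.zip data.tail).map (fun p => p.2 - p.1)

theorem pvDiffs_length (data : List Int) : (pvDiffs data).length = data.length - 1 := by
  simp [pvDiffs, List.length_zip]

theorem pvDiffs_getElem (data : List Int) (k : Nat) (hk : k < (pvDiffs data).length) :
    (pvDiffs data)[k] =
      data[k + 1]'(by simp [pvDiffs, List.length_zip] at hk; omega) -
      data[k]'(by simp [pvDiffs, List.length_zip] at hk; omega) := by
  simp [pvDiffs, List.getElem_zip, List.getElem_tail]

theorem dotCompute_map (data : List Int) :
    dotCompute data =
      ((PySem.List.pyRange 0 ((data.length : Int) - 2) 1).map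
        (fun i => PySem.List.pyGetD data (i + 1) 0 - PySem.List.pyGetD data i 0),
       (PySem.List.pyRange 0 ((data.length : Int) - 2) 1).map
        (fun i => PySem.List.pyGetD data (i + 2) 0 - PySem.List.pyGetD data (i + 1) 0)) := by
  unfold dotCompute
  rw [PySem.List.foldl_prod_mk
    (f := fun acc i => acc ++ [PySem.List.pyGetD data (i + 1) 0 - PySem.List.pyGetD data i 0])
    (g := fun acc i => acc ++ [PySem.List.pyGetD data (i + 2) 0 - PySem.List.pyGetD data (i + 1) 0])]
  rw [PySem.List.foldl_append_singleton_eq_map, PySem.List.foldl_append_singleton_eq_map]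
  simp

theorem dotCompute_eq_canon (data : List Int) :
    dotCompute data = ((pvDiffs data).dropLast, (pvDiffs data).tail) := by
  rw [dotCompute_map, PySem.List.pyRange_one]
  refine Prod.ext ?_ ?_ <;> simp only []
  · apply List.ext_getElem
    · simp [pvDiffs_length]; omega
    · intro k h1 h2
      have hk : k < data.length - 2 := by simp at h1; omega
      have hlen : k < (pvDiffs data).length := by rw [pvDiffs_length]; omega
      rw [List.getElem_dropLast, List.getElem_map, List.getElem_map, List.getElem_range,
        pvDiffs_getElem data k hlen]
      have e1 : (0 : Int) + (k : Int) + 1 = ((k + 1 : Nat) : Int) := by push_cast; ring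
      have e0 : (0 : Int) + (k : Int) = ((k : Nat) : Int) := by omega
      rw [e1, e0, PySem.List.pyGetD_natCast, PySem.List.pyGetD_natCast,
        List.getD_eq_getElem _ _ (by omega), List.getD_eq_getElem _ _ (by omega)]
  · apply List.ext_getElem
    · simp [pvDiffs_length]; omega
    · intro k h1 h2
      have hk : k < data.length - 2 := by simp at h1; omega
      rw [List.getElem_tail, List.getElem_map, List.getElem_map, List.getElem_range,
        pvDiffs_getElem data (k + 1) (by rw [pvDiffs_length]; omega)]
      have e2 : (0 : Int) + (k : Int) + 2 = ((k + 1 + 1 : Nat) : Int) := by push_cast; ring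
      have e1 : (0 : Int) + (k : Int) + 1 = ((k + 1 : Nat) : Int) := by push_cast; ring
      rw [e2, e1, PySem.List.pyGetD_natCast, PySem.List.pyGetD_natCast,
        List.getD_eq_getElem _ _ (by omega), List.getD_eq_getElem _ _ (by omega)]

-- diffs of a prefix / suffix
theorem pvDiffs_take (data : List Int) (k : Nat) (hk : 1 ≤ k) :
    pvDiffs (data.take k) = (pvDiffs data).take (k - 1) := by
  apply List.ext_getElem
  · simp [pvDiffs_length]; omega
  · intro j h1 h2
    have hj2 : j < (pvDiffs data).length := by
      simp [pvDiffs_length, List.length_take] at h1 ⊢; omega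
    rw [pvDiffs_getElem _ j h1]
    simp only [List.getElem_take]
    rw [pvDiffs_getElem data j hj2]

theorem pvDiffs_drop (data : List Int) (m : Nat) :
    pvDiffs (data.drop m) = (pvDiffs data).drop m := by
  apply List.ext_getElem
  · simp [pvDiffs_length]; omega
  · intro j h1 h2
    have hj2 : m + j < (pvDiffs data).length := by
      simp [pvDiffs_length, List.length_drop] at h1 ⊢; omega
    rw [pvDiffs_getElem _ j h1]
    simp only [List.getElem_drop]
    rw [pvDiffs_getElem data (m + j) hj2]
    congr 2

theorem dropLast_overlap_split (l : List Int) (m : Nat) (hm : 1 ≤ m) (h : m + 1 ≤ l.length) :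
    (l.take (m + 1)).dropLast ++ (l.drop m).dropLast = l.dropLast := by
  apply List.ext_getElem
  · simp [List.length_take, List.length_drop]; omega
  · intro k h1 h2
    rw [List.getElem_append]
    split
    · next hlt =>
      have hk : k < m := by
        simp [List.length_take, List.length_dropLast] at hlt; omega
      rw [List.getElem_dropLast, List.getElem_take, List.getElem_dropLast]
    · next hge =>
      have hk : m ≤ k := by
        simp [List.length_take, List.length_dropLast] at hge; omega
      rw [List.getElem_dropLast, List.getElem_drop, List.getElem_dropLast]
      congr 1
      simp [List.length_take]; omega

theorem tail_overlap_split (l : List Int) (m : Nat) (hm : 1 ≤ m) (h : m + 1 ≤ l.length) :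
    (l.take (m + 1)).tail ++ (l.drop m).tail = l.tail := by
  apply List.ext_getElem
  · simp [List.length_take, List.length_drop]; omega
  · intro k h1 h2
    rw [List.getElem_append]
    split
    · next hlt =>
      have hk : k < m := by
        simp [List.length_take, List.length_tail] at hlt; omega
      rw [List.getElem_tail, List.getElem_take, List.getElem_tail]
    · next hge =>
      have hk : m ≤ k := by
        simp [List.length_take, List.length_tail] at hge; omega
      rw [List.getElem_tail, List.getElem_drop, List.getElem_tail]
      congr 1
      simp [List.length_take]; omega

theorem go_eq_canon (fuel : Nat) :
    ∀ (l : List Int), l.length ≤ fuel →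
      dotComputeGo fuel l = ((pvDiffs l).dropLast, (pvDiffs l).tail) := by
  induction fuel with
  | zero =>
    intro l hl
    have : l = [] := List.eq_nil_of_length_eq_zero (by omega)
    subst this
    simp [dotComputeGo, pvDiffs]
  | succ fuel ih =>
    intro l hl
    simp only [dotComputeGo]
    split
    · next hlt =>
      match l, hlt with
      | [], _ => simp [pvDiffs]
      | [a], _ => simp [pvDiffs]
      | [a, b], _ => simp [pvDiffs]
    · next hge =>
      split
      · next h3 =>
        match l, h3 with
        | [a, b, c], _ =>
          simp [pvDiffs, PySem.List.pyGetD, PySem.List.pyGet?, PySem.List.pyIdx?]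
      · next h3 =>
        have hlen : 3 < l.length := by omega
        have hm1 : 1 ≤ min (l.length / 2) (l.length - 3) := by omega
        have hm2 : min (l.length / 2) (l.length - 3) ≤ l.length - 3 := by omega
        rw [ih (l.take (min (l.length / 2) (l.length - 3) + 2))
              (by simp [List.length_take]; omega),
            ih (l.drop (min (l.length / 2) (l.length - 3)))
              (by simp [List.length_drop]; omega)]
        rw [pvDiffs_take l (min (l.length / 2) (l.length - 3) + 2) (by omega)]
        have hkk : min (l.length / 2) (l.length - 3) + 2 - 1
            = min (l.length / 2) (l.length - 3) + 1 := by omega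
        rw [hkk]
        have hml : min (l.length / 2) (l.length - 3) + 1 ≤ (pvDiffs l).length := by
          rw [pvDiffs_length]; omega
        dsimp only
        rw [pvDiffs_drop]
        rw [dropLast_overlap_split _ _ hm1 hml, tail_overlap_split _ _ hm1 hml]

theorem alt_eq_canon (data : List Int) :
    dotCompute_alt data = ((pvDiffs data).dropLast, (pvDiffs data).tail) :=
  go_eq_canon data.length data le_rfl

-- ===== VERDICT (by name: the statement is the Claim_ definition above) =====
theorem dotCompute_spec : Claim_equal_dotCompute := by
  intro data _
  show dotCompute data = dotCompute_alt data
  rw [dotCompute_eq_canon, alt_eq_canon]
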